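-- pv_equiv track=rewrite | github.com/daniel-reich/turbo-robot | vuSXW3iEnEQNZXjAP_4.py | create_square
-- ===== SOURCE A (Python) =====
-- def create_square(length):
--   if length == None or length < 1: return ""
--   if length == 1: return "#"
--   square = '#' * length + "\n"
--   for x in range(1, length - 1):
--     square += "#" + (" " * (length - 2)) + "#\n"
--   square += "#" * length
--   return square
-- ===== SOURCE B (Python) =====
-- def create_square(length):
--     if length is None or length < 1:
--         return ""
--     w = length + 1
--     buf = bytearray(b" " * (length * w - 1))
--     buf[w - 1 :: w] = b"\n" * (length - 1)   # newline column
--     buf[0:length] = b"#" * length            # top row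
--     buf[(length - 1) * w :] = b"#" * length  # bottom row
--     buf[0::w] = b"#" * length                # left column
--     buf[length - 1 :: w] = b"#" * length     # right column
--     return buf.decode("ascii")
-- ===== Notes on version B (the rewrite author's own statement) =====
-- stated objective: alternative
-- what changed: Replaces A's sequential row-template construction (top line, loop appending a fixed middle-row string, bottom line, special case for length 1) by painting a flat space-filled byte canvas of size n*(n+1)-1 with five strided slice-assignments (newline column, top row, bottom row, left column, right column); no rows, no string concatenation loop, no length-1 branch.
import Mathlib
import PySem

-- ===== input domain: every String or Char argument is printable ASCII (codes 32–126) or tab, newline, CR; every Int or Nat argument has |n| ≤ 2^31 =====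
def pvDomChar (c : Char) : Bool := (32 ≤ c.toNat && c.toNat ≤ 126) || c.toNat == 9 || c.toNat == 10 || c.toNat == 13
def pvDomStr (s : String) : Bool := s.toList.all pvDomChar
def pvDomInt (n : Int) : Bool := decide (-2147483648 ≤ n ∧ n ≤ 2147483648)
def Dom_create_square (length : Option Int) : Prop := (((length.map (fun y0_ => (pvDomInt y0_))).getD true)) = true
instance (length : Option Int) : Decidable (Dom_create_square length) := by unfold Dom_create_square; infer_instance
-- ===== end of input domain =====

-- B replaces A's row-template construction by painting a flat space-filled character canvas with five strided slice-assignments (newline column, top, bottom, left, right).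


-- ===== PORT A =====
def create_square (length : Option Int) : String :=
  match length with
  | none => ""
  | some n =>
    if n < 1 then "" else
    if n = 1 then "#" else
    let square := PySem.List.pyRepeat ['#'] n ++ ['\n']
    let square := (PySem.List.pyRange 1 (n - 1) 1).foldl
      (fun s _ => s ++ ['#'] ++ PySem.List.pyRepeat [' '] (n - 2) ++ ['#', '\n']) square
    String.ofList (square ++ PySem.List.pyRepeat ['#'] n)

-- ===== PORT B =====
-- hand-ported helper: Python's strided slice-assignment buf[start::step] = c*m with exactly m
-- slice positions, all in range; written left to right, exact for nonnegative start/step as used below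
def pvStrideWrite (buf : List Char) (start step : Nat) (cs : List Char) : List Char :=
  match cs with
  | [] => buf
  | c :: rest => pvStrideWrite (buf.set start c) (start + step) step rest

def create_square_alt (length : Option Int) : String :=
  match length with
  | none => ""
  | some n =>
    if n < 1 then "" else
    -- indices are nonnegative here, so Nat buffer positions are exact
    let nn := n.toNat
    let w := nn + 1
    let buf := List.replicate (nn * w - 1) ' '
    let buf := pvStrideWrite buf (w - 1) w (List.replicate (nn - 1) '\n')  -- buf[w-1::w] = "\n"*(n-1)
    let buf := pvStrideWrite buf 0 1 (List.replicate nn '#')              -- buf[0:n] = "#"*n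
    let buf := pvStrideWrite buf ((nn - 1) * w) 1 (List.replicate nn '#') -- buf[(n-1)*w:] = "#"*n
    let buf := pvStrideWrite buf 0 w (List.replicate nn '#')              -- buf[0::w] = "#"*n
    let buf := pvStrideWrite buf (nn - 1) w (List.replicate nn '#')       -- buf[n-1::w] = "#"*n
    String.ofList buf

-- ===== PRECONDITION & SPEC =====
def Spec_create_square (length : Option Int) (out : String) : Prop := out = create_square_alt length
instance (length : Option Int) (out : String) : Decidable (Spec_create_square length out) := by unfold Spec_create_square; infer_instance

-- ===== CLAIM (what is proved, stated in full; the proofs are below) =====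
def Claim_equal_create_square : Prop := ∀ (length : Option Int), Dom_create_square length → Spec_create_square length (create_square length)

-- ===== LEMMAS AND PROOFS =====

-- the character B's strokes leave at flat position t, for side n = k+2 and row width w = k+3
def pvCell (k t : Nat) : Char :=
  if t % (k+3) = k+2 then '\n'
  else if t / (k+3) = 0 ∨ t / (k+3) = k+1 ∨ t % (k+3) = 0 ∨ t % (k+3) = k+1 then '#' else ' '

theorem pv_foldl_const_append {α β : Type} (l : List α) (p q r init : List β) :
    l.foldl (fun s _ => s ++ p ++ q ++ r) init = init ++ (List.replicate l.length (p ++ q ++ r)).flatten := by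
  induction l generalizing init with
  | nil => simp
  | cons a t ih =>
    rw [List.foldl_cons, ih, List.length_cons, List.replicate_succ]
    simp [List.append_assoc]

-- ---- A's concatenation, cell by cell ----

theorem pv_cell_decode (k r t : Nat) (ht : t < k + 3) :
    pvCell k (t + r * (k+3)) =
      (if t = k+2 then '\n'
       else if r = 0 ∨ r = k+1 ∨ t = 0 ∨ t = k+1 then '#' else ' ') := by
  unfold pvCell
  rw [Nat.add_mul_mod_self_right, Nat.add_mul_div_right _ _ (by omega), Nat.mod_eq_of_lt ht,
    Nat.div_eq_of_lt ht, Nat.zero_add]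

theorem pv_row_top (k : Nat) :
    (List.range (k+3)).map (fun t => pvCell k (t + 0 * (k+3)))
      = List.replicate (k+2) '#' ++ ['\n'] := by
  rw [List.range_succ, List.map_append, List.map_singleton,
    pv_cell_decode k 0 (k+2) (by omega), if_pos rfl]
  congr 1
  rw [List.map_congr_left (g := fun _ => '#') (by
      intro t htm; rw [List.mem_range] at htm
      rw [pv_cell_decode k 0 t (by omega), if_neg (by omega), if_pos (by omega)]),
    List.map_const', List.length_range]

theorem pv_row_mid (k r : Nat) (h1 : 1 ≤ r) (h2 : r ≤ k) :
    (List.range (k+3)).map (fun t => pvCell k (t + r * (k+3)))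
      = '#' :: (List.replicate k ' ' ++ ['#', '\n']) := by
  have e : List.range (k+3) = 0 :: ((List.range k).map (· + 1) ++ ([k+1] ++ [k+2])) := by
    rw [show k+3 = (k+2)+1 by omega, List.range_succ, show k+2 = (k+1)+1 by omega,
      List.range_succ, List.range_succ_eq_map]
    simp
  rw [e]
  simp only [List.map_cons, List.map_append, List.map_map]
  rw [pv_cell_decode k r 0 (by omega), if_neg (by omega), if_pos (by omega),
    pv_cell_decode k r (k+1) (by omega), if_neg (by omega), if_pos (by omega),
    pv_cell_decode k r (k+2) (by omega), if_pos rfl]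
  rw [List.map_congr_left (g := fun _ => ' ') (by
      intro t htm; rw [List.mem_range] at htm
      simp only [Function.comp_apply]
      rw [pv_cell_decode k r (t+1) (by omega), if_neg (by omega), if_neg (by omega)]),
    List.map_const', List.length_range]
  simp

theorem pv_row_bot (k : Nat) :
    (List.range (k+2)).map (fun t => pvCell k (t + (k+1) * (k+3)))
      = List.replicate (k+2) '#' := by
  rw [List.map_congr_left (g := fun _ => '#') (by
      intro t htm; rw [List.mem_range] at htm
      rw [pv_cell_decode k (k+1) t (by omega), if_neg (by omega), if_pos (by omega)]),
    List.map_const', List.length_range]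

theorem pv_mid_block (k m : Nat) : ∀ r0 : Nat, 1 ≤ r0 → r0 + m = k + 1 →
    (List.range (m * (k+3) + (k+2))).map (fun t => pvCell k (t + r0 * (k+3)))
      = (List.replicate m (('#' :: (List.replicate k ' ' ++ ['#'])) ++ ['\n'])).flatten
          ++ List.replicate (k+2) '#' := by
  induction m with
  | zero =>
    intro r0 _ h2
    have : r0 = k + 1 := by omega
    subst this
    simpa using pv_row_bot k
  | succ m ih =>
    intro r0 h1 h2
    rw [show (m+1) * (k+3) + (k+2) = (k+3) + (m * (k+3) + (k+2)) by ring, List.range_add,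
      List.map_append, List.map_map]
    rw [show (fun t => pvCell k (t + r0 * (k+3))) ∘ (fun x => (k+3) + x)
        = fun t => pvCell k (t + (r0+1) * (k+3)) by funext t; simp; ring_nf,
      ih (r0+1) (by omega) (by omega), pv_row_mid k r0 h1 (by omega)]
    simp [List.replicate_succ, List.append_assoc]

-- the whole flat grid for n = k+2, in A's concatenated form
theorem pv_grid (k : Nat) :
    (List.range ((k+2) * (k+3) - 1)).map (pvCell k)
      = (List.replicate (k+2) '#' ++ ['\n'])
          ++ ((List.replicate k (('#' :: (List.replicate k ' ' ++ ['#'])) ++ ['\n'])).flatten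
            ++ List.replicate (k+2) '#') := by
  rw [show (k+2) * (k+3) - 1 = (k+3) + (k * (k+3) + (k+2)) by ring_nf; omega, List.range_add,
    List.map_append, List.map_map]
  rw [show pvCell k ∘ (fun x => (k+3) + x) = fun t => pvCell k (t + 1 * (k+3)) by
      funext t; simp; ring_nf,
    pv_mid_block k k 1 (by omega) (by omega)]
  congr 1
  have := pv_row_top k
  simpa using this

-- ---- B's strokes, cell by cell ----

theorem pv_stride_len (buf : List Char) (s st : Nat) (cs : List Char) :
    (pvStrideWrite buf s st cs).length = buf.length := by
  induction cs generalizing buf s with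
  | nil => rfl
  | cons c rest ih => rw [pvStrideWrite, ih, List.length_set]

theorem pv_stride_get? (st : Nat) (c : Char) (m : Nat) :
    ∀ (s : Nat) (buf : List Char) (t : Nat),
      (pvStrideWrite buf s st (List.replicate m c))[t]? =
        if (∃ i < m, t = s + i * st) ∧ t < buf.length then some c else buf[t]? := by
  induction m with
  | zero =>
    intro s buf t
    rw [List.replicate_zero, pvStrideWrite, if_neg (by rintro ⟨⟨i, hi, _⟩, _⟩; omega)]
  | succ m ih =>
    intro s buf t
    rw [List.replicate_succ, pvStrideWrite, ih (s + st) (buf.set s c) t, List.length_set,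
      List.getElem?_set]
    by_cases h0 : s = t
    · subst h0
      by_cases hl : s < buf.length
      · rw [if_pos (show (∃ i < m + 1, s = s + i * st) ∧ s < buf.length from ⟨⟨0, by omega, by simp⟩, hl⟩)]
        split_ifs <;> simp_all
      · have hnone : buf[s]? = none := List.getElem?_eq_none (by omega)
        split_ifs <;> simp_all
    · have he : ((∃ i < m, t = (s + st) + i * st) ↔ (∃ i < m + 1, t = s + i * st)) := by
        constructor
        · rintro ⟨i, hi, rfl⟩
          exact ⟨i + 1, by omega, by ring⟩
        · rintro ⟨i, hi, hti⟩
          match i with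
          | 0 => exact absurd (by simpa using hti.symm) h0
          | j + 1 => exact ⟨j, by omega, by rw [hti]; ring⟩
      rw [if_neg h0]
      simp only [he]

-- contiguous-run membership, in div/mod coordinates
theorem pv_ex_stride (w s m q r t : Nat) (hw : 0 < w) (hs : s < w)
    (hqr : t = w * q + r) (hr : r < w) :
    (∃ i < m, t = s + i * w) ↔ (r = s ∧ q < m) := by
  constructor
  · rintro ⟨i, hi, he⟩
    have h3 : t % w = r := by rw [hqr, Nat.mul_add_mod, Nat.mod_eq_of_lt hr]
    have h4 : t / w = q := by rw [hqr, Nat.mul_add_div hw, Nat.div_eq_of_lt hr, Nat.add_zero]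
    have h1 : t % w = s := by rw [he, Nat.add_mul_mod_self_right, Nat.mod_eq_of_lt hs]
    have h2 : t / w = i := by rw [he, Nat.add_mul_div_right _ _ hw, Nat.div_eq_of_lt hs, Nat.zero_add]
    exact ⟨by omega, by omega⟩
  · rintro ⟨hrs, hqm⟩
    exact ⟨q, hqm, by rw [hqr, hrs]; ring⟩

theorem pv_ex_one (s m t : Nat) :
    (∃ i < m, t = s + i * 1) ↔ (s ≤ t ∧ t < s + m) := by
  constructor
  · rintro ⟨i, hi, rfl⟩; omega
  · rintro ⟨h1, h2⟩; exact ⟨t - s, by omega, by omega⟩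

theorem pv_strokes (k : Nat) :
    pvStrideWrite
      (pvStrideWrite
        (pvStrideWrite
          (pvStrideWrite
            (pvStrideWrite (List.replicate ((k+2) * (k+3) - 1) ' ')
              (k+2) (k+3) (List.replicate (k+1) '\n'))
            0 1 (List.replicate (k+2) '#'))
          ((k+1) * (k+3)) 1 (List.replicate (k+2) '#'))
        0 (k+3) (List.replicate (k+2) '#'))
      (k+1) (k+3) (List.replicate (k+2) '#')
    = (List.range ((k+2) * (k+3) - 1)).map (pvCell k) := by
  apply List.ext_getElem?
  intro t
  rw [pv_stride_get?, pv_stride_get?, pv_stride_get?, pv_stride_get?, pv_stride_get?]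
  simp only [pv_stride_len, List.length_replicate]
  have hrhs : ((List.range ((k+2) * (k+3) - 1)).map (pvCell k))[t]?
      = if t < (k+2) * (k+3) - 1 then some (pvCell k t) else none := by
    split_ifs with h
    · rw [List.getElem?_eq_getElem (by simpa using h)]; simp
    · rw [List.getElem?_eq_none (by simpa using h)]
  rw [hrhs]
  by_cases hT : t < (k+2) * (k+3) - 1
  · simp only [List.getElem?_replicate, if_pos hT]
    have hqr := (Nat.div_add_mod t (k+3)).symm
    have hr : t % (k+3) < k+3 := Nat.mod_lt t (by omega)
    have hqb : t / (k+3) < k + 2 := by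
      rw [Nat.div_lt_iff_lt_mul (by omega)]
      exact lt_of_lt_of_le hT (Nat.sub_le _ _)
    obtain ⟨q, hgq⟩ : ∃ q, t / (k+3) = q := ⟨_, rfl⟩
    obtain ⟨r, hgr⟩ : ∃ r, t % (k+3) = r := ⟨_, rfl⟩
    rw [hgq] at hqr hqb
    rw [hgr] at hqr hr
    have e5 := pv_ex_stride (k+3) (k+1) (k+2) q r t (by omega) (by omega) hqr hr
    have e4 := pv_ex_stride (k+3) 0 (k+2) q r t (by omega) (by omega) hqr hr
    have e1 := pv_ex_stride (k+3) (k+2) (k+1) q r t (by omega) (by omega) hqr hr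
    have hcomm : (k+3) * (k+1) = (k+1) * (k+3) := by ring
    have e3 : (∃ i < k+2, t = (k+1) * (k+3) + i * 1) ↔ (q = k+1 ∧ r ≤ k+1) := by
      rw [pv_ex_one]
      constructor
      · rintro ⟨hl, hu⟩
        have hq : q = k+1 := by
          by_contra hne
          rcases Nat.lt_or_ge q (k+1) with h | h
          · have h4 : (k+3) * q + (k+3) ≤ (k+1) * (k+3) := by
              calc (k+3) * q + (k+3) = (k+3) * (q+1) := by ring
                _ ≤ (k+3) * (k+1) := Nat.mul_le_mul_left _ (by omega)
                _ = (k+1) * (k+3) := by ring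
            linarith
          · have h4 : (k+1) * (k+3) + (k+3) ≤ (k+3) * q := by
              calc (k+1) * (k+3) + (k+3) = (k+3) * (k+2) := by ring
                _ ≤ (k+3) * q := Nat.mul_le_mul_left _ (by omega)
            linarith
        subst hq
        exact ⟨rfl, by linarith⟩
      · rintro ⟨hq, hrr⟩
        subst hq
        constructor <;> linarith
    have e2 : (∃ i < k+2, t = 0 + i * 1) ↔ (q = 0 ∧ r ≤ k+1) := by
      rw [pv_ex_one]
      constructor
      · rintro ⟨_, hu⟩
        have h0 : q = 0 := by rw [← hgq]; exact Nat.div_eq_of_lt (by omega)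
        have h1 : r = t := by rw [← hgr]; exact Nat.mod_eq_of_lt (by omega)
        omega
      · rintro ⟨hq, hrr⟩
        subst hq
        simp only [Nat.mul_zero, Nat.zero_add] at hqr
        omega
    have hq2 : q = k+1 → r ≤ k+1 := by
      intro hq
      subst hq
      have h5 : (k+3) * (k+1) + (k+3) = (k+2) * (k+3) := by ring
      generalize hA : (k+3) * (k+1) = A at hqr h5
      generalize hB : (k+2) * (k+3) = B at h5 hT
      omega
    simp only [hT, and_true, e5, e4, e3, e2, e1, pvCell, hgq, hgr]
    split_ifs <;> first | rfl | omega
  · simp only [List.getElem?_replicate]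
    simp [hT]

-- ===== VERDICT (by name: the statement is the Claim_ definition above) =====
theorem create_square_spec : Claim_equal_create_square := by
  intro length _
  unfold Spec_create_square
  match length with
  | none => rfl
  | some n =>
    by_cases h1 : n < 1
    · simp [create_square, create_square_alt, h1]
    · by_cases h2 : n = 1
      · subst h2; decide
      · obtain ⟨k, hk⟩ : ∃ k : Nat, n = (k : Int) + 2 := ⟨(n - 2).toNat, by omega⟩
        subst hk
        have hlt : ¬ ((k : Int) + 2 < 1) := by omega
        have hne : ¬ ((k : Int) + 2 = 1) := by omega
        have ht : ((k:Int) + 2).toNat = k + 2 := by omega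
        simp only [create_square, create_square_alt, if_neg hlt,
          PySem.List.pyRepeat_singleton, ht,
          show ((k : Int) + 2 - 2).toNat = k by omega]
        rw [if_neg hne]
        rw [PySem.List.pyRange_one, pv_foldl_const_append, List.length_map, List.length_range,
          show ((k:Int) + 2 - 1 - 1).toNat = k by omega]
        rw [show (k+2) * ((k+2) + 1) - 1 = (k+2) * (k+3) - 1 from rfl,
          show (k+2) + 1 - 1 = k+2 from rfl, show (k+2) - 1 = k+1 from rfl]
        rw [pv_strokes, pv_grid]
        simp [List.append_assoc]
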